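-- pv_equiv track=rewrite | github.com/jsage8/find_consecutive | find_consecutive.py | find_consecutive_runs
-- ===== SOURCE A (Python) =====
-- from collections import deque
--
-- def find_consecutive_runs(values, run_length=3, step=1):
--     """
--     Find all runs of three consecutive numbers that increase or decrease by one. Return the start
--     indices of the first element in each run. If there are no consecutive runs, None will be
--     returned.
--
--     Example: [1, 2, 3, 5, 10, 9, 8, 9, 10, 11, 7, 8, 7] returns [0, 4, 6, 7]
--
--     :param values: A list of integer values to check for consecutive runs.
--     :ptype values: list
--     :param run_length: The run length to check for.
--     :ptype run_length: int
--     :param step: The increment or decrement step size in run.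
--     :ptype step: int
--     :return: A list of index values corresponding to where runs begin within the values list.
--     :raises: ValueError when run_length is <= 1 or step is < 1
--     :rtype: list or None
--     """
--     run_indices = []
--     previous_element = None
--     start_indices = deque()
--     '''
--     direction values:
--         -1: current run is decreasing
--         0:  current run is just starting
--         1:  current run is increasing
--     '''
--     direction = 0
--
--     if run_length <= 1:
--         raise ValueError("Runs of 1 or less are not allowed.")
--     if step < 1:
--         raise ValueError("Step of less than 1 is not allowed.")
--
--     for index, value in enumerate(values):
--         # The value is part of an increasing run
--         if value - step == previous_element:
--             if direction == -1:
--                 temp = start_indices.pop()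
--                 start_indices.clear()
--                 start_indices.append(temp)
--             direction = 1
--             start_indices.append(index)
--         # The value is part of a decreasing run
--         elif value + step == previous_element:
--             if direction == 1:
--                 temp = start_indices.pop()
--                 start_indices.clear()
--                 start_indices.append(temp)
--             direction = -1
--             start_indices.append(index)
--         # The value is not yet part of a run
--         else:
--             start_indices.clear()
--             start_indices.append(index)
--             direction = 0
--
--         # If the number of indices in start_indices is equal to the expected run_length then the
--         # first index is the start of a run and should be returned
--         if len(start_indices) >= run_length:
--             run_indices.append(start_indices.popleft())
--         previous_element = value
--     if not run_indices:
--         run_indices = None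
--     return run_indices
-- ===== SOURCE B (Python) =====
-- def find_consecutive_runs(values, run_length=3, step=1):
--     """Staged re-implementation: first map the list to a sequence of difference
--     codes (+1 / -1 / 0 per adjacent pair), then run-length-encode that code
--     sequence and emit run start indices arithmetically per monotone group."""
--     if run_length <= 1:
--         raise ValueError("Runs of 1 or less are not allowed.")
--     if step < 1:
--         raise ValueError("Step of less than 1 is not allowed.")
--     codes = []
--     for i in range(1, len(values)):
--         d = values[i] - values[i - 1]
--         codes.append(1 if d == step else (-1 if d == -step else 0))
--     result = []
--     need = run_length - 1
--     n = len(codes)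
--     i = 0
--     while i < n:
--         j = i + 1
--         while j < n and codes[j] == codes[i]:
--             j += 1
--         if codes[i] != 0:
--             for k in range(j - i - need + 1):
--                 result.append(i + k)
--         i = j
--     return result or None
-- ===== Notes on version B (the rewrite author's own statement) =====
-- stated objective: alternative
-- what changed: Replaces A's online deque state machine (direction flag, pop/clear/popleft per element) by two staged passes: map the list to +1/-1/0 difference codes, then run-length-encode the code sequence and emit each group's run start indices by arithmetic (i+k for k in range(L-need+1)).
import Mathlib
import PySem

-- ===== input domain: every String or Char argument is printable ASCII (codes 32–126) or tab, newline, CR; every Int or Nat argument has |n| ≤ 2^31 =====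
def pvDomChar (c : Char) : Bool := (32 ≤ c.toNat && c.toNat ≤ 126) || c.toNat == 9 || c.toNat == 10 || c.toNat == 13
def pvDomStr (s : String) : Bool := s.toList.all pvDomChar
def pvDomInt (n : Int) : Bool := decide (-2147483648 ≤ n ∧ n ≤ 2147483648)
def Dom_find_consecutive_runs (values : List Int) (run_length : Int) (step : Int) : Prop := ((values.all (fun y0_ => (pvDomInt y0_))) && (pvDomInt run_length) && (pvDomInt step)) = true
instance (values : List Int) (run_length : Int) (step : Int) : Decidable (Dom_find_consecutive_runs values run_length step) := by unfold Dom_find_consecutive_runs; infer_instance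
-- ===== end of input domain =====

-- B replaces A's online deque state machine by two staged passes: a difference-code
-- list (+1/-1/0 per adjacent pair), then run-length grouping with arithmetic emission
-- of start indices (objective: alternative; same O(n) cost).

-- ===== PORT A =====
-- Transliteration of A's loop: state = (index, previous_element, start_indices deque,
-- direction, run_indices). deque.pop() is taking the last element (the deque is never
-- empty when that branch runs, so getLastD 0 is exact), popleft is head/tail.
def pvA_loop (run_length step : Int) :
    List Int → Int → Option Int → List Int → Int → List Int → List Int
  | [], _, _, _, _, run_indices => run_indices
  | value :: rest, index, prev, start_indices, direction, run_indices =>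
    let sd : List Int × Int :=
      if prev = some (value - step) then
        (((if direction = -1 then [start_indices.getLastD 0] else start_indices) ++ [index]), 1)
      else if prev = some (value + step) then
        (((if direction = 1 then [start_indices.getLastD 0] else start_indices) ++ [index]), -1)
      else ([index], 0)
    let rs : List Int × List Int :=
      if run_length ≤ (sd.1.length : Int) then
        (run_indices ++ [sd.1.headD 0], sd.1.tail)
      else (run_indices, sd.1)
    pvA_loop run_length step rest (index + 1) (some value) rs.2 sd.2 rs.1

def find_consecutive_runs (values : List Int) (run_length : Int) (step : Int) : Option (List Int) :=
  -- the two ValueError guards are excluded by Pre_; `none` stands in for the raise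
  if run_length ≤ 1 then none
  else if step < 1 then none
  else
    let run_indices := pvA_loop run_length step values 0 none [] 0 []
    if run_indices = [] then none else some run_indices

-- ===== PORT B =====
-- codes pass: codes.append(1 if d == step else (-1 if d == -step else 0)) pairwise
def pvCodes (step : Int) : List Int → List Int
  | [] => []
  | [_] => []
  | a :: b :: rest =>
    (if b - a = step then 1 else if b - a = -step then -1 else 0) :: pvCodes step (b :: rest)

-- grouping pass: outer while over i, inner while scanning the equal-code group,
-- then `for k in range(j - i - need + 1): result.append(i + k)` when the code ≠ 0
def pvEmit (run_length : Int) : List Int → Int → List Int → List Int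
  | [], _, result => result
  | c :: rest, i, result =>
    let grp := rest.takeWhile (fun x => x = c)
    let L : Int := (grp.length : Int) + 1
    let result' :=
      if c ≠ 0 then
        result ++ (PySem.List.pyRange 0 (L - (run_length - 1) + 1) 1).map (fun k => i + k)
      else result
    pvEmit run_length (rest.dropWhile (fun x => x = c)) (i + L) result'
  termination_by codes => codes.length
  decreasing_by
    have := List.length_dropWhile_le (fun x => x = c) rest
    simp; omega

def find_consecutive_runs_alt (values : List Int) (run_length : Int) (step : Int) : Option (List Int) :=
  if run_length ≤ 1 then none
  else if step < 1 then none
  else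
    let result := pvEmit run_length (pvCodes step values) 0 []
    if result = [] then none else some result

-- ===== PRECONDITION & SPEC =====
-- Pre_ excludes exactly the inputs on which A raises ValueError (run_length ≤ 1 or step < 1).
def Pre_find_consecutive_runs (values : List Int) (run_length : Int) (step : Int) : Prop :=
  2 ≤ run_length ∧ 1 ≤ step
instance (values : List Int) (run_length : Int) (step : Int) : Decidable (Pre_find_consecutive_runs values run_length step) := by unfold Pre_find_consecutive_runs; infer_instance

def pvWitness_find_consecutive_runs : List Int × Int × Int := ([1, 2, 3, 5, 10, 9, 8, 9, 10, 11, 7, 8, 7], 3, 1)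

def Spec_find_consecutive_runs (values : List Int) (run_length : Int) (step : Int) (out : Option (List Int)) : Prop := out = find_consecutive_runs_alt values run_length step
instance (values : List Int) (run_length : Int) (step : Int) (out : Option (List Int)) : Decidable (Spec_find_consecutive_runs values run_length step out) := by unfold Spec_find_consecutive_runs; infer_instance

-- ===== CLAIM (what is proved, stated in full; the proofs are below) =====
def Claim_equal_find_consecutive_runs : Prop := ∀ (values : List Int) (run_length : Int) (step : Int), Dom_find_consecutive_runs values run_length step → Pre_find_consecutive_runs values run_length step → Spec_find_consecutive_runs values run_length step (find_consecutive_runs values run_length step)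

-- ===== LEMMAS AND PROOFS =====

-- Proof-only intermediate: A's deque reduced to a run-length counter + direction flag.
def pvC_loop (run_length step : Int) :
    List Int → Int → Option Int → Int → Int → List Int → List Int
  | [], _, _, _, _, result => result
  | value :: rest, index, prev, cnt, direction, result =>
    let cd : Int × Int :=
      if prev = some (value - step) then ((if direction = -1 then 2 else cnt + 1), 1)
      else if prev = some (value + step) then ((if direction = 1 then 2 else cnt + 1), -1)
      else (1, 0)
    let result := if run_length ≤ cd.1 then result ++ [index - run_length + 1] else result
    pvC_loop run_length step rest (index + 1) (some value) cd.1 cd.2 result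

-- The deque of A always holds the last L candidate indices, consecutive and ending at i.
def mkDeque (i : Int) : Nat → List Int
  | 0 => []
  | L + 1 => mkDeque (i - 1) L ++ [i]

theorem mkDeque_cons (i : Int) (L : Nat) : mkDeque i (L + 1) = (i - L) :: mkDeque i L := by
  induction L generalizing i with
  | zero => simp [mkDeque]
  | succ L ih =>
    show mkDeque (i - 1) (L + 1) ++ [i] = _
    rw [ih (i - 1)]
    simp [mkDeque]
    ring_nf

theorem mkDeque_length (i : Int) (L : Nat) : (mkDeque i L).length = L := by
  induction L generalizing i with
  | zero => rfl
  | succ L ih => simp [mkDeque, ih]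

theorem mkDeque_getLastD (i : Int) (L : Nat) (d : Int) :
    (mkDeque i (L + 1)).getLastD d = i := by
  simp [mkDeque]

theorem mkDeque_headD (i : Int) (L : Nat) (d : Int) :
    (mkDeque i (L + 1)).headD d = i - L := by
  rw [mkDeque_cons]; rfl

theorem mkDeque_tail (i : Int) (L : Nat) : (mkDeque i (L + 1)).tail = mkDeque i L := by
  rw [mkDeque_cons]; rfl

-- Invariant step: A's deque state corresponds to the counter state.
theorem loop_eq (run_length step : Int) (hrl : 2 ≤ run_length) :
    ∀ (rest : List Int) (index p cnt direction : Int) (acc : List Int) (L : Nat),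
    1 ≤ cnt → (L : Int) = min cnt (run_length - 1) →
    pvA_loop run_length step rest index (some p) (mkDeque (index - 1) L) direction acc
      = pvC_loop run_length step rest index (some p) cnt direction acc := by
  intro rest
  induction rest with
  | nil => intro _ _ _ _ _ _ _ _; rfl
  | cons value rest ih =>
    intro index p cnt direction acc L hcnt hL
    rw [pvA_loop, pvC_loop]
    by_cases h1 : (some p : Option Int) = some (value - step)
    · by_cases hdir : direction = -1
      · -- pivot to increasing: deque becomes [index-1, index], cnt' = 2
        obtain ⟨L', rfl⟩ : ∃ L', L = L' + 1 := ⟨L - 1, by omega⟩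
        simp only [if_pos h1, if_pos hdir, mkDeque_getLastD]
        have hdq : ([index - 1] ++ [index] : List Int) = mkDeque index 2 := by
          simp [mkDeque]
        simp only [hdq, mkDeque_length]
        by_cases hemit : run_length ≤ (2 : Int)
        · rw [if_pos (show run_length ≤ ((2 : Nat) : Int) by exact_mod_cast hemit),
              if_pos hemit, mkDeque_headD, mkDeque_tail]
          have hv : index - ((1 : Nat) : Int) = index - run_length + 1 := by
            have : run_length = 2 := by omega
            simp [this]; ring
          rw [hv]
          have h1' : index + 1 - 1 = index := by ring
          rw [show (mkDeque index 1) = mkDeque (index + 1 - 1) 1 by rw [h1']]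
          exact ih (index + 1) value 2 1 _ 1 (by omega) (by omega)
        · rw [if_neg (show ¬ run_length ≤ ((2 : Nat) : Int) by push_cast; omega),
              if_neg hemit]
          rw [show (mkDeque index 2) = mkDeque (index + 1 - 1) 2 by norm_num]
          exact ih (index + 1) value 2 1 _ 2 (by omega) (by omega)
      · -- continuing increasing run: deque grows to L+1, cnt' = cnt+1
        simp only [if_pos h1, if_neg hdir]
        have hdq : mkDeque (index - 1) L ++ [index] = mkDeque index (L + 1) := rfl
        simp only [hdq, mkDeque_length]
        by_cases hemit : run_length ≤ cnt + 1
        · rw [if_pos (show run_length ≤ ((L + 1 : Nat) : Int) by push_cast; omega),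
              if_pos hemit, mkDeque_headD, mkDeque_tail]
          rw [show index - (L : Int) = index - run_length + 1 by omega]
          rw [show (mkDeque index L) = mkDeque (index + 1 - 1) L by norm_num]
          exact ih (index + 1) value (cnt + 1) 1 _ L (by omega) (by omega)
        · rw [if_neg (show ¬ run_length ≤ ((L + 1 : Nat) : Int) by push_cast; omega),
              if_neg hemit]
          rw [show (mkDeque index (L + 1)) = mkDeque (index + 1 - 1) (L + 1) by norm_num]
          exact ih (index + 1) value (cnt + 1) 1 _ (L + 1) (by omega) (by push_cast; omega)
    · by_cases h2 : (some p : Option Int) = some (value + step)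
      · -- decreasing branch, mirror image of the increasing one
        by_cases hdir : direction = 1
        · obtain ⟨L', rfl⟩ : ∃ L', L = L' + 1 := ⟨L - 1, by omega⟩
          simp only [if_neg h1, if_pos h2, if_pos hdir, mkDeque_getLastD]
          have hdq : ([index - 1] ++ [index] : List Int) = mkDeque index 2 := by
            simp [mkDeque]
          simp only [hdq, mkDeque_length]
          by_cases hemit : run_length ≤ (2 : Int)
          · rw [if_pos (show run_length ≤ ((2 : Nat) : Int) by exact_mod_cast hemit),
                if_pos hemit, mkDeque_headD, mkDeque_tail]
            have hv : index - ((1 : Nat) : Int) = index - run_length + 1 := by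
              have : run_length = 2 := by omega
              simp [this]; ring
            rw [hv]
            rw [show (mkDeque index 1) = mkDeque (index + 1 - 1) 1 by norm_num]
            exact ih (index + 1) value 2 (-1) _ 1 (by omega) (by omega)
          · rw [if_neg (show ¬ run_length ≤ ((2 : Nat) : Int) by push_cast; omega),
                if_neg hemit]
            rw [show (mkDeque index 2) = mkDeque (index + 1 - 1) 2 by norm_num]
            exact ih (index + 1) value 2 (-1) _ 2 (by omega) (by omega)
        · simp only [if_neg h1, if_pos h2, if_neg hdir]
          have hdq : mkDeque (index - 1) L ++ [index] = mkDeque index (L + 1) := rfl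
          simp only [hdq, mkDeque_length]
          by_cases hemit : run_length ≤ cnt + 1
          · rw [if_pos (show run_length ≤ ((L + 1 : Nat) : Int) by push_cast; omega),
                if_pos hemit, mkDeque_headD, mkDeque_tail]
            rw [show index - (L : Int) = index - run_length + 1 by omega]
            rw [show (mkDeque index L) = mkDeque (index + 1 - 1) L by norm_num]
            exact ih (index + 1) value (cnt + 1) (-1) _ L (by omega) (by omega)
          · rw [if_neg (show ¬ run_length ≤ ((L + 1 : Nat) : Int) by push_cast; omega),
                if_neg hemit]
            rw [show (mkDeque index (L + 1)) = mkDeque (index + 1 - 1) (L + 1) by norm_num]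
            exact ih (index + 1) value (cnt + 1) (-1) _ (L + 1) (by omega) (by push_cast; omega)
      · -- break: deque becomes [index], cnt' = 1
        simp only [if_neg h1, if_neg h2]
        have hdq : ([index] : List Int) = mkDeque index 1 := by simp [mkDeque]
        simp only [hdq, mkDeque_length]
        rw [if_neg (show ¬ run_length ≤ ((1 : Nat) : Int) by push_cast; omega),
            if_neg (show ¬ run_length ≤ (1 : Int) by omega)]
        rw [show (mkDeque index 1) = mkDeque (index + 1 - 1) 1 by norm_num]
        exact ih (index + 1) value 1 0 _ 1 (by omega) (by omega)

-- First iteration (previous_element = None) handled separately, then the invariant applies.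
theorem loop_eq_start (run_length step : Int) (hrl : 2 ≤ run_length) (values : List Int) :
    pvA_loop run_length step values 0 none [] 0 [] = pvC_loop run_length step values 0 none 0 0 [] := by
  cases values with
  | nil => rfl
  | cons value rest =>
    rw [pvA_loop, pvC_loop]
    rw [if_neg (show ¬ (none : Option Int) = some (value - step) by simp),
        if_neg (show ¬ (none : Option Int) = some (value - step) by simp),
        if_neg (show ¬ (none : Option Int) = some (value + step) by simp),
        if_neg (show ¬ (none : Option Int) = some (value + step) by simp)]
    rw [if_neg (show ¬ run_length ≤ ((([0] : List Int)).length : Int) by simp; omega),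
        if_neg (show ¬ run_length ≤ (1 : Int) by omega)]
    rw [show ([(0 : Int)] : List Int) = mkDeque (1 - 1) 1 by simp [mkDeque]]
    rw [show (0 : Int) + 1 = 1 by ring]
    exact loop_eq run_length step hrl rest 1 value 1 0 [] 1 (by omega) (by omega)

-- Proof-only intermediate 2: the counter loop driven by the difference codes.
def pvD_loop (run_length : Int) : List Int → Int → Int → Int → List Int → List Int
  | [], _, _, _, acc => acc
  | c :: rest, index, cnt, dir, acc =>
    let cnt' := if c = 0 then 1 else if c = dir then cnt + 1 else 2
    let acc := if run_length ≤ cnt' then acc ++ [index - run_length + 1] else acc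
    pvD_loop run_length rest (index + 1) cnt' c acc

-- The value-driven counter loop only depends on the difference codes.
theorem c_eq_d (run_length step : Int) (hrl : 2 ≤ run_length) (hst : 1 ≤ step) :
    ∀ (rest : List Int) (p index cnt dir : Int) (acc : List Int),
    (dir = 0 → cnt = 1) → (dir = -1 ∨ dir = 0 ∨ dir = 1) →
    pvC_loop run_length step rest index (some p) cnt dir acc
      = pvD_loop run_length (pvCodes step (p :: rest)) index cnt dir acc := by
  intro rest
  induction rest with
  | nil => intro _ _ _ _ _ _ _; rfl
  | cons v rest ih =>
    intro p index cnt dir acc h0 hdir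
    rw [pvC_loop, show pvCodes step (p :: v :: rest)
        = (if v - p = step then 1 else if v - p = -step then -1 else 0) :: pvCodes step (v :: rest)
        from rfl, pvD_loop]
    by_cases h1 : v - p = step
    · have hp : (some p : Option Int) = some (v - step) := by
        simp; omega
      rw [if_pos h1, if_pos hp]
      have hc : ((1 : Int) = 0) = False := by simp
      have hcnt : (if dir = -1 then 2 else cnt + 1)
          = (if (1 : Int) = 0 then 1 else if 1 = dir then cnt + 1 else 2) := by
        rcases hdir with h | h | h <;> simp [h] <;> omega
      rw [← hcnt]
      exact ih v (index + 1) _ 1 _ (by simp) (by simp)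
    · by_cases h2 : v - p = -step
      · have hp1 : ¬ (some p : Option Int) = some (v - step) := by simp; omega
        have hp2 : (some p : Option Int) = some (v + step) := by simp; omega
        rw [if_neg h1, if_pos h2, if_neg hp1, if_pos hp2]
        have hcnt : (if dir = 1 then 2 else cnt + 1)
            = (if (-1 : Int) = 0 then 1 else if -1 = dir then cnt + 1 else 2) := by
          rcases hdir with h | h | h <;> simp [h] <;> omega
        rw [← hcnt]
        exact ih v (index + 1) _ (-1) _ (by simp) (by simp)
      · have hp1 : ¬ (some p : Option Int) = some (v - step) := by simp; omega
        have hp2 : ¬ (some p : Option Int) = some (v + step) := by simp; omega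
        rw [if_neg h1, if_neg h2, if_neg hp1, if_neg hp2]
        exact ih v (index + 1) 1 0 _ (fun _ => rfl) (by simp)

-- Indices emitted while a nonzero-code group continues with incoming counter cnt.
def emitsFrom (run_length : Int) : Int → Int → Nat → List Int
  | _, _, 0 => []
  | j, cnt, len + 1 =>
    (if run_length ≤ cnt + 1 then [j - run_length + 1] else [])
      ++ emitsFrom run_length (j + 1) (cnt + 1) (len)

-- processing an all-zero block: counter pinned at 1, nothing emitted
theorem d_zero_block (run_length : Int) (hrl : 2 ≤ run_length) :
    ∀ (g : List Int), (∀ x ∈ g, x = 0) → ∀ (rest : List Int) (i : Int) (acc : List Int),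
    pvD_loop run_length (g ++ rest) i 1 0 acc
      = pvD_loop run_length rest (i + g.length) 1 0 acc := by
  intro g
  induction g with
  | nil => intro _ rest i acc; simp
  | cons x g ih =>
    intro hg rest i acc
    have hx : x = 0 := hg x (by simp)
    subst hx
    rw [List.cons_append, pvD_loop]
    simp only [reduceIte]
    rw [if_neg (show ¬ run_length ≤ (1 : Int) by omega)]
    rw [ih (fun y hy => hg y (by simp [hy])) rest (i + 1) acc]
    congr 1
    push_cast [List.length_cons]
    ring

-- processing a block of equal nonzero codes continuing the current run
theorem d_run_block (run_length c : Int) (hc : c ≠ 0) :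
    ∀ (g : List Int), (∀ x ∈ g, x = c) → ∀ (rest : List Int) (j cnt : Int) (acc : List Int),
    pvD_loop run_length (g ++ rest) j cnt c acc
      = pvD_loop run_length rest (j + g.length) (cnt + g.length) c
          (acc ++ emitsFrom run_length j cnt g.length) := by
  intro g
  induction g with
  | nil => intro _ _ j cnt acc; simp [emitsFrom]
  | cons x g ih =>
    intro hg rest j cnt acc
    have hx : x = c := hg x (by simp)
    subst hx
    rw [List.cons_append, pvD_loop]
    rw [if_neg hc, if_pos (rfl : x = x)]
    rw [ih (fun y hy => hg y (by simp [hy])) rest (j + 1) (cnt + 1)]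
    rw [show (x :: g).length = g.length + 1 from List.length_cons ..]
    rw [emitsFrom]
    congr 1
    · push_cast; ring
    · push_cast; ring
    · by_cases h : run_length ≤ cnt + 1
      · rw [if_pos h, if_pos h]
        simp [List.append_assoc]
      · rw [if_neg h, if_neg h]
        simp

-- closed form of emitsFrom once the counter has reached the threshold
theorem emitsFrom_ge (run_length : Int) :
    ∀ (len : Nat) (j cnt : Int), run_length - 1 ≤ cnt →
    emitsFrom run_length j cnt len
      = (List.range len).map (fun (k : Nat) => j + (k : Int) - run_length + 1) := by
  intro len
  induction len with
  | zero => intro _ _ _; simp [emitsFrom]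
  | succ len ih =>
    intro j cnt h
    rw [emitsFrom, if_pos (by omega), ih (j + 1) (cnt + 1) (by omega),
        List.range_succ_eq_map, List.map_cons, List.map_map]
    simp only [List.singleton_append]
    congr 1
    · push_cast; ring
    · apply List.map_congr_left
      intro k _
      simp only [Function.comp_apply]
      push_cast
      ring

-- closed form of emitsFrom below the threshold
theorem emitsFrom_lt (run_length : Int) :
    ∀ (len : Nat) (j cnt : Int), 1 ≤ cnt → cnt ≤ run_length - 1 →
    emitsFrom run_length j cnt len
      = (List.range ((len + cnt + 1 - run_length : Int)).toNat).map
          (fun (k : Nat) => j - cnt + (k : Int)) := by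
  intro len
  induction len with
  | zero =>
    intro j cnt _ h2
    rw [emitsFrom, show ((0 : Nat) + cnt + 1 - run_length : Int).toNat = 0 by omega]
    simp
  | succ len ih =>
    intro j cnt h1 h2
    by_cases h : run_length ≤ cnt + 1
    · have hcnt : cnt = run_length - 1 := by omega
      rw [emitsFrom, if_pos h, emitsFrom_ge run_length len (j + 1) (cnt + 1) (by omega)]
      rw [show ((len + 1 : Nat) + cnt + 1 - run_length : Int).toNat = len + 1 by push_cast; omega,
          List.range_succ_eq_map, List.map_cons, List.map_map]
      simp only [List.singleton_append]
      congr 1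
      · push_cast; omega
      · apply List.map_congr_left
        intro k _
        simp only [Function.comp_apply]
        push_cast
        omega
    · rw [emitsFrom, if_neg h, ih (j + 1) (cnt + 1) (by omega) (by omega)]
      simp only [List.nil_append]
      rw [show ((len : Int) + (cnt + 1) + 1 - run_length) = ((len + 1 : Nat) + cnt + 1 - run_length : Int) by push_cast; ring]
      apply List.map_congr_left
      intro k _
      ring

-- the arithmetic emission of one whole nonzero group, in B's pyRange form
theorem group_emission (run_length : Int) (hrl : 2 ≤ run_length) (i : Int) (len : Nat) :
    emitsFrom run_length (i + 1) 1 (len + 1)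
      = (PySem.List.pyRange 0 (((len : Int) + 1) - (run_length - 1) + 1) 1).map (fun k => i + k) := by
  rw [emitsFrom_lt run_length (len + 1) (i + 1) 1 (by omega) (by omega),
      PySem.List.pyRange_one, List.map_map]
  rw [show (((len : Int) + 1) - (run_length - 1) + 1 - 0) = ((len + 1 : Nat) + 1 + 1 - run_length : Int) by push_cast; ring]
  apply List.map_congr_left
  intro k _
  simp only [Function.comp_apply]
  ring

-- head of what dropWhile leaves fails the predicate
theorem head?_dropWhile_ne (c h : Int) (rest : List Int)
    (hh : (rest.dropWhile (fun x => x = c)).head? = some h) : h ≠ c := by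
  have hf : rest.find? (fun x => !(decide (x = c))) = some h := by
    rw [List.find?_not_eq_head?_dropWhile]
    exact hh
  have := List.find?_some hf
  simpa using this

-- the code-driven counter loop equals B's group-by-group emission pass
theorem d_eq_emit (run_length : Int) (hrl : 2 ≤ run_length) :
    ∀ (n : Nat) (codes : List Int), codes.length ≤ n →
    ∀ (i cnt dir : Int) (acc : List Int),
    (∀ c, codes.head? = some c → c = 0 ∨ dir ≠ c) →
    pvD_loop run_length codes (i + 1) cnt dir acc = pvEmit run_length codes i acc := by
  intro n
  induction n with
  | zero =>
    intro codes hlen i cnt dir acc _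
    rw [show codes = [] from List.eq_nil_of_length_eq_zero (by omega)]
    rw [pvD_loop, pvEmit]
  | succ n ih =>
    intro codes hlen i cnt dir acc hinv
    cases codes with
    | nil => rw [pvD_loop, pvEmit]
    | cons c rest =>
      have hsplit : rest = rest.takeWhile (fun x => x = c) ++ rest.dropWhile (fun x => x = c) :=
        (List.takeWhile_append_dropWhile).symm
      have hg : ∀ x ∈ rest.takeWhile (fun x => x = c), x = c := by
        intro x hx
        have := List.mem_takeWhile_imp hx
        simpa using this
      have hdroplen : (rest.dropWhile (fun x => x = c)).length ≤ n := by
        have := List.length_dropWhile_le (fun x => x = c) rest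
        simp at hlen; omega
      rw [pvEmit]
      by_cases hc : c = 0
      · subst hc
        rw [pvD_loop]
        simp only [reduceIte]
        rw [if_neg (show ¬ run_length ≤ (1 : Int) by omega)]
        conv_lhs => rw [hsplit]
        rw [d_zero_block run_length hrl _ hg _ (i + 1 + 1) acc]
        rw [show i + 1 + 1 + ((rest.takeWhile (fun x => x = (0:Int))).length : Int)
            = (i + (((rest.takeWhile (fun x => x = (0:Int))).length : Int) + 1)) + 1 by ring]
        exact ih _ hdroplen _ 1 0 acc
          (fun h hh => Or.inr (Ne.symm (head?_dropWhile_ne 0 h rest hh)))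
      · have hdir : dir ≠ c := by
          rcases hinv c rfl with h | h
          · exact absurd h hc
          · exact h
        rw [pvD_loop]
        rw [if_neg hc, if_neg (show ¬ c = dir from fun h => hdir h.symm)]
        conv_lhs => rw [hsplit]
        rw [d_run_block run_length c hc _ hg _ (i + 1 + 1) 2]
        have hacc : (if run_length ≤ (1:Int) + 1 then acc ++ [i + 1 - run_length + 1] else acc)
              ++ emitsFrom run_length (i + 1 + 1) 2 (rest.takeWhile (fun x => x = c)).length
            = acc ++ emitsFrom run_length (i + 1) 1 ((rest.takeWhile (fun x => x = c)).length + 1) := by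
          rw [emitsFrom]
          by_cases h : run_length ≤ (1:Int) + 1
          · rw [if_pos h, if_pos h]
            simp [List.append_assoc]
          · rw [if_neg h, if_neg h]
            simp
        rw [show (2 : Int) = (1:Int) + 1 from rfl] at *
        rw [hacc, group_emission run_length hrl i]
        rw [if_pos hc]
        rw [show i + 1 + 1 + ((rest.takeWhile (fun x => x = c)).length : Int)
            = (i + (((rest.takeWhile (fun x => x = c)).length : Int) + 1)) + 1 by ring]
        rw [show (1 : Int) + 1 + ((rest.takeWhile (fun x => x = c)).length : Int)
            = ((rest.takeWhile (fun x => x = c)).length : Int) + 2 by ring]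
        exact ih _ hdroplen _ _ c _
          (fun h hh => Or.inr (Ne.symm (head?_dropWhile_ne c h rest hh)))

-- the two pipelines agree from the start
theorem pipelines_eq (run_length step : Int) (hrl : 2 ≤ run_length) (hst : 1 ≤ step)
    (values : List Int) :
    pvA_loop run_length step values 0 none [] 0 []
      = pvEmit run_length (pvCodes step values) 0 [] := by
  rw [loop_eq_start run_length step hrl values]
  cases values with
  | nil => rw [pvC_loop, show pvCodes step [] = [] from rfl, pvEmit.eq_def]
  | cons v rest =>
    rw [pvC_loop]
    rw [if_neg (show ¬ (none : Option Int) = some (v - step) by simp),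
        if_neg (show ¬ (none : Option Int) = some (v + step) by simp)]
    simp only [if_neg (show ¬ run_length ≤ (1 : Int) by omega)]
    norm_num
    rw [c_eq_d run_length step hrl hst rest v 1 1 0 [] (fun _ => rfl) (by simp)]
    have h := d_eq_emit run_length hrl (pvCodes step (v :: rest)).length _ le_rfl 0 1 0 []
      (fun c _ => by by_cases h : c = 0; exact Or.inl h; exact Or.inr (Ne.symm h))
    norm_num at h
    exact h

-- ===== VERDICT (by name: the statement is the Claim_ definition above) =====
theorem find_consecutive_runs_spec : Claim_equal_find_consecutive_runs := by
  intro values run_length step _ hpre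
  obtain ⟨hrl, hst⟩ := hpre
  unfold Spec_find_consecutive_runs find_consecutive_runs find_consecutive_runs_alt
  rw [if_neg (by omega : ¬ run_length ≤ 1), if_neg (by omega : ¬ step < 1),
      if_neg (by omega : ¬ run_length ≤ 1), if_neg (by omega : ¬ step < 1)]
  simp only [pipelines_eq run_length step hrl hst values]
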